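-- pv_equiv track=rewrite | github.com/bsbhakti/dynamic_snake_pathfinding | dicbs.py | validate_paths_against_obstacles
-- ===== SOURCE A (Python) =====
-- def validate_paths_against_obstacles(paths, dynamic_obstacles):
--     """Validate that the computed paths respect all dynamic obstacle constraints."""
--     obstacle_constraints = {}
--     for position, start_time, duration in dynamic_obstacles:
--         for t in range(start_time, start_time + duration):
--             obstacle_constraints[(position, t)] = True
--
--     for path in paths:
--         for position, time in path:
--             if (position, time) in obstacle_constraints:
--                 return False
--     return True
-- ===== SOURCE B (Python) =====
-- def validate_paths_against_obstacles(paths, dynamic_obstacles):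
--     """Validate that the computed paths respect all dynamic obstacle constraints."""
--     return all(
--         not any(pos == opos and s <= t < s + d for opos, s, d in dynamic_obstacles)
--         for path in paths
--         for pos, t in path
--     )
-- ===== Notes on version B (the rewrite author's own statement) =====
-- stated objective: simpler
-- what changed: Instead of materialising every (position, time) cell of each obstacle's duration in a dict and testing membership, B tests each path point directly against each obstacle's time interval (s <= t < s+d), avoiding the range expansion entirely.
import Mathlib
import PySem

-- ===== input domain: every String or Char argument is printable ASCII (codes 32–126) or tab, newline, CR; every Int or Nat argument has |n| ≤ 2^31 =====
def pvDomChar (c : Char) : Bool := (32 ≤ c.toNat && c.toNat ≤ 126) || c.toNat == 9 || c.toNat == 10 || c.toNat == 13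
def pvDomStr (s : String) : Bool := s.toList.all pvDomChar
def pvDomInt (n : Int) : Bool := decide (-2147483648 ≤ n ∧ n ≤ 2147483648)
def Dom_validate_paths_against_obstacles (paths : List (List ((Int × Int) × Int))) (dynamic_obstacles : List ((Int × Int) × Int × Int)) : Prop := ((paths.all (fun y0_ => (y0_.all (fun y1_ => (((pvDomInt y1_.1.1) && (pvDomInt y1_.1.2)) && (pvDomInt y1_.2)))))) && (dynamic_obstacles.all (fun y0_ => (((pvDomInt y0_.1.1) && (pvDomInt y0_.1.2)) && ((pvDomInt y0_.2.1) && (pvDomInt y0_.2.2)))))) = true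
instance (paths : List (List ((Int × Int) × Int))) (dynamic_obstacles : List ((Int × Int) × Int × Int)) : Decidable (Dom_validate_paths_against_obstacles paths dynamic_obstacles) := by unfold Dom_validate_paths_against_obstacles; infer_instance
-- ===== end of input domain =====

-- B replaces A's per-time-step dict expansion by a direct interval test per path point (simpler; no range materialisation).
-- ===== PORT A =====
-- A: build dict {(position, t): True} over every t of every obstacle's duration, then scan path points for membership.
def validate_paths_against_obstacles (paths : List (List ((Int × Int) × Int))) (dynamic_obstacles : List ((Int × Int) × Int × Int)) : Bool :=
  let obstacle_constraints : PySem.Dict ((Int × Int) × Int) Bool :=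
    dynamic_obstacles.foldl
      (fun d ob =>
        (PySem.List.pyRange ob.2.1 (ob.2.1 + ob.2.2) 1).foldl
          (fun d t => d.insert (ob.1, t) true) d)
      PySem.Dict.empty
  paths.all (fun path => path.all (fun pt => !(obstacle_constraints.contains pt)))

-- ===== PORT B =====
-- B: a path point (pos, t) hits obstacle (opos, s, d) iff pos = opos and s ≤ t < s + d.
def pvHits (dynamic_obstacles : List ((Int × Int) × Int × Int)) (pt : (Int × Int) × Int) : Bool :=
  dynamic_obstacles.any (fun ob => decide (pt.1 = ob.1 ∧ ob.2.1 ≤ pt.2 ∧ pt.2 < ob.2.1 + ob.2.2))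

def validate_paths_against_obstacles_alt (paths : List (List ((Int × Int) × Int))) (dynamic_obstacles : List ((Int × Int) × Int × Int)) : Bool :=
  (paths.flatMap (fun path => path)).all (fun pt => !pvHits dynamic_obstacles pt)

-- ===== PRECONDITION & SPEC =====
def Spec_validate_paths_against_obstacles (paths : List (List ((Int × Int) × Int))) (dynamic_obstacles : List ((Int × Int) × Int × Int)) (out : Bool) : Prop := out = validate_paths_against_obstacles_alt paths dynamic_obstacles
instance (paths : List (List ((Int × Int) × Int))) (dynamic_obstacles : List ((Int × Int) × Int × Int)) (out : Bool) : Decidable (Spec_validate_paths_against_obstacles paths dynamic_obstacles out) := by unfold Spec_validate_paths_against_obstacles; infer_instance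

-- ===== CLAIM (what is proved, stated in full; the proofs are below) =====
def Claim_equal_validate_paths_against_obstacles : Prop := ∀ (paths : List (List ((Int × Int) × Int))) (dynamic_obstacles : List ((Int × Int) × Int × Int)), Dom_validate_paths_against_obstacles paths dynamic_obstacles → Spec_validate_paths_against_obstacles paths dynamic_obstacles (validate_paths_against_obstacles paths dynamic_obstacles)

-- ===== LEMMAS AND PROOFS =====

-- folding inserts of keys (p, t) over any list of times
lemma contains_foldl_insert_list (p : Int × Int) (l : List Int) (d : PySem.Dict ((Int × Int) × Int) Bool) (k : (Int × Int) × Int) :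
    (l.foldl (fun d t => d.insert (p, t) true) d).contains k
      = (d.contains k || l.any (fun t => k == (p, t))) := by
  induction l generalizing d with
  | nil => simp
  | cons t l ih =>
    simp only [List.foldl_cons, ih, PySem.Dict.contains_insert, List.any_cons]
    cases d.contains k <;> simp [Bool.or_comm]

-- inner loop: inserting keys (p, t) for every t in the range
lemma contains_foldl_insert_range (p : Int × Int) (a b : Int) (d : PySem.Dict ((Int × Int) × Int) Bool) (k : (Int × Int) × Int) :
    ((PySem.List.pyRange a b 1).foldl (fun d t => d.insert (p, t) true) d).contains k
      = (d.contains k || decide (k.1 = p ∧ a ≤ k.2 ∧ k.2 < b)) := by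
  rw [contains_foldl_insert_list]
  congr 1
  rcases k with ⟨kp, kt⟩
  rw [Bool.eq_iff_iff]
  simp only [List.any_eq_true, PySem.List.mem_pyRange_one, beq_iff_eq, Prod.mk.injEq, decide_eq_true_eq]
  constructor
  · rintro ⟨t, ⟨h1, h2⟩, h3, h4⟩
    subst h3; subst h4; exact ⟨rfl, h1, h2⟩
  · rintro ⟨h1, h2, h3⟩
    exact ⟨kt, ⟨h2, h3⟩, h1, rfl⟩

-- outer loop over the obstacle list
lemma contains_foldl_obstacles (obs : List ((Int × Int) × Int × Int)) (d : PySem.Dict ((Int × Int) × Int) Bool) (k : (Int × Int) × Int) :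
    (obs.foldl (fun d ob => (PySem.List.pyRange ob.2.1 (ob.2.1 + ob.2.2) 1).foldl (fun d t => d.insert (ob.1, t) true) d) d).contains k
      = (d.contains k || pvHits obs k) := by
  induction obs generalizing d with
  | nil => simp [pvHits]
  | cons ob obs ih =>
    simp only [List.foldl_cons, ih, contains_foldl_insert_range, pvHits, List.any_cons]
    cases d.contains k <;> simp

-- ===== VERDICT =====
theorem validate_paths_against_obstacles_spec : Claim_equal_validate_paths_against_obstacles := by
  intro paths obs _
  unfold Spec_validate_paths_against_obstacles validate_paths_against_obstacles validate_paths_against_obstacles_alt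
  simp only [contains_foldl_obstacles, PySem.Dict.contains_empty, Bool.false_or]
  simp
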